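-- pv_equiv track=rewrite | github.com/rohan19a/indian_towns | endings.py | find_endings
-- ===== SOURCE A (Python) =====
-- def find_endings(words, endings):
--     endings_count = []
--     for ending in endings:
--         count = 0
--         for word in words:
--             if word.endswith(ending):
--                 count += 1
--         endings_count.append(count)
--     return endings_count
-- ===== SOURCE B (Python) =====
-- def find_endings(words, endings):
--     counts = {}
--     for word in words:
--         for i in range(len(word) + 1):
--             suf = word[i:]
--             counts[suf] = counts.get(suf, 0) + 1
--     return [counts.get(e, 0) for e in endings]
-- ===== Notes on version B (the rewrite author's own statement) =====
-- stated objective: faster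
-- what changed: Instead of scanning all words once per ending (E*W endswith tests), B builds a counter of every suffix of every word in one pass and answers each ending by a single dict lookup.
import Mathlib
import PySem

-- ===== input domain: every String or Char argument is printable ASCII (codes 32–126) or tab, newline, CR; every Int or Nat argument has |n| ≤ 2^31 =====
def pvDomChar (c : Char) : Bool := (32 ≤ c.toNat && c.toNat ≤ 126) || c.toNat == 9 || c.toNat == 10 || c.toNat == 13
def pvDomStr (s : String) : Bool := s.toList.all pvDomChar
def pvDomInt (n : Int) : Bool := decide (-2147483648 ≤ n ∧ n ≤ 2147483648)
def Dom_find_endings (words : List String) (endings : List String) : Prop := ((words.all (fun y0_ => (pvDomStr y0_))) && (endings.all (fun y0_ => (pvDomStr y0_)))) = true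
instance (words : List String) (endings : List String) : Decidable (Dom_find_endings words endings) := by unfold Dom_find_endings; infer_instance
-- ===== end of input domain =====

-- B replaces A's E×W nested endswith scans by one suffix Counter over the words, looked up once per ending (asymptotically faster).

-- ===== PORT A =====
def find_endings (words : List String) (endings : List String) : List Int :=
  endings.foldl (fun endings_count ending =>
    endings_count ++
      [words.foldl (fun count word =>
        if PySem.Str.endswith word ending then count + 1 else count) (0 : Int)]) []

-- ===== PORT B =====
def find_endings_alt (words : List String) (endings : List String) : List Int :=
  let counts : PySem.Dict String Int :=
    words.foldl (fun counts word =>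
      (PySem.List.pyRange 0 (PySem.Str.len word + 1) 1).foldl (fun counts i =>
        let suf := PySem.Str.slice word (some i) none
        counts.insert suf (counts.getD suf 0 + 1)) counts) PySem.Dict.empty
  endings.map (fun e => counts.getD e 0)

-- ===== PRECONDITION & SPEC =====
def Spec_find_endings (words : List String) (endings : List String) (out : List Int) : Prop := out = find_endings_alt words endings
instance (words : List String) (endings : List String) (out : List Int) : Decidable (Spec_find_endings words endings out) := by unfold Spec_find_endings; infer_instance

-- ===== CLAIM (what is proved, stated in full; the proofs are below) =====
def Claim_equal_find_endings : Prop := ∀ (words : List String) (endings : List String), Dom_find_endings words endings → Spec_find_endings words endings (find_endings words endings)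

-- ===== LEMMAS AND PROOFS =====

-- All index-0..len suffixes of cs contain a given list exactly once iff it is a suffix.
lemma count_suffixes (cs e : List Char) :
    (((List.range (cs.length + 1)).map (fun i => cs.drop i)).count e : Nat)
      = if e <:+ cs then 1 else 0 := by
  induction cs with
  | nil =>
    by_cases h : e = ([]:List Char) <;> simp [h, List.suffix_nil]
  | cons c cs ih =>
    have h2 : (c :: cs).length + 1 = (cs.length + 1) + 1 := by simp
    rw [h2, List.range_succ_eq_map]
    simp only [List.map_cons, List.drop_zero, List.map_map, List.count_cons]
    have hmap : (List.range (cs.length + 1)).map ((fun i => (c :: cs).drop i) ∘ Nat.succ)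
        = (List.range (cs.length + 1)).map (fun i => cs.drop i) := by
      simp [Function.comp]
    rw [hmap, ih]
    by_cases h : e = c :: cs
    · subst h
      have hns : ¬ (c :: cs) <:+ cs := by
        intro hs; have := hs.length_le; simp at this
      simp [hns]
    · have hbeq : (c :: cs == e) = false := by
        simp only [beq_eq_false_iff_ne, ne_eq]
        exact fun hh => h hh.symm
      simp [hbeq, List.suffix_cons_iff, h]

lemma sum_ite_eq_countP (p : String → Bool) (l : List String) :
    (l.map (fun w => if p w then 1 else 0)).sum = l.countP p := by
  induction l with
  | nil => simp
  | cons w ws ih => by_cases h : p w <;> simp [h, ih, Nat.add_comm]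

lemma ofList_injective : Function.Injective String.ofList := by
  intro a b h
  have := congrArg String.toList h
  simpa using this

-- B's per-word suffix list, written as strings of the char-level suffixes.
lemma suffix_list_eq (w : String) :
    ((PySem.List.pyRange 0 (PySem.Str.len w + 1) 1).map (fun i => PySem.Str.slice w (some i) none))
      = (List.range (w.toList.length + 1)).map (fun i => String.ofList (w.toList.drop i)) := by
  have hlen : PySem.Str.len w + 1 = ((w.toList.length + 1 : Nat) : Int) := by
    rw [PySem.Str.len_eq]; push_cast; ring
  rw [hlen, PySem.List.pyRange_zero_natCast, List.map_map]
  apply List.map_congr_left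
  intro i _
  show PySem.Str.slice w (some (i : Int)) none = String.ofList (w.toList.drop i)
  unfold PySem.Str.slice PySem.Chars.slice
  rw [PySem.List.slice_from_natCast]

-- In the flattened suffix multiset, a string occurs once per word it is a suffix of.
lemma count_flat_suffixes (words : List String) (e : String) :
    ((words.flatMap (fun w => (PySem.List.pyRange 0 (PySem.Str.len w + 1) 1).map
        (fun i => PySem.Str.slice w (some i) none))).count e : Nat)
      = words.countP (fun w => PySem.Str.endswith w e) := by
  rw [List.flatMap_def, List.count_flatten, List.map_map]
  simp only [Function.comp_def]
  have hmap : (words.map (fun w => ((PySem.List.pyRange 0 (PySem.Str.len w + 1) 1).map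
        (fun i => PySem.Str.slice w (some i) none)).count e))
      = words.map (fun w => if PySem.Str.endswith w e then 1 else 0) := by
    apply List.map_congr_left
    intro w _
    rw [suffix_list_eq]
    have he : e = String.ofList e.toList := by simp
    calc ((List.range (w.toList.length + 1)).map (fun i => String.ofList (w.toList.drop i))).count e
        = ((List.range (w.toList.length + 1)).map (fun i => w.toList.drop i)).count e.toList := by
          have h3 := List.count_map_of_injective
            ((List.range (w.toList.length + 1)).map (fun i => w.toList.drop i))
            String.ofList ofList_injective e.toList
          simpa [List.map_map, Function.comp_def] using h3
      _ = if e.toList <:+ w.toList then 1 else 0 := count_suffixes _ _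
      _ = if PySem.Str.endswith w e then 1 else 0 := by
          unfold PySem.Str.endswith PySem.Chars.endswith
          by_cases h : e.toList <:+ w.toList
          · simp [h, List.isSuffixOf_iff_suffix.mpr h]
          · have : e.toList.isSuffixOf w.toList = false := by
              rw [Bool.eq_false_iff]; intro hc
              exact h (List.isSuffixOf_iff_suffix.mp hc)
            simp [h, this]
  rw [hmap]
  exact sum_ite_eq_countP _ _

-- ===== VERDICT (by name: the statement is the Claim_ definition above) =====
theorem find_endings_spec : Claim_equal_find_endings := by
  intro words endings _
  unfold Spec_find_endings find_endings find_endings_alt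
  rw [PySem.List.foldl_append_singleton_eq_map, List.nil_append]
  have hcounts :
      (words.foldl (fun counts word =>
        (PySem.List.pyRange 0 (PySem.Str.len word + 1) 1).foldl (fun counts i =>
          let suf := PySem.Str.slice word (some i) none
          counts.insert suf (counts.getD suf 0 + 1)) counts) PySem.Dict.empty)
      = PySem.Dict.counter (words.flatMap (fun w =>
          (PySem.List.pyRange 0 (PySem.Str.len w + 1) 1).map
            (fun i => PySem.Str.slice w (some i) none))) := by
    rw [← PySem.Dict.foldl_insert_getD_add_one_eq_counter, List.foldl_flatMap]
    apply PySem.List.foldl_congr_mem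
    intro acc w _
    rw [List.foldl_map]
  rw [hcounts]
  apply List.map_congr_left
  intro e _
  rw [PySem.Dict.getD_counter, count_flat_suffixes]
  rw [PySem.List.foldl_if_add_one]
  simp
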